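-- pv_equiv track=rewrite | github.com/Phucptit2003/Python-PTIT | 12-7-2.py | tinh_tong_thetich_max
-- ===== SOURCE A (Python) =====
-- def tinh_tong_thetich_max(n, thetich_banh, thetich_noi):
--     # Khởi tạo một ma trận DP với kích thước (n+1) x (thetich_noi+1)
--     dp = [[0] * (thetich_noi + 1) for _ in range(n + 1)]
--
--     for i in range(1, n + 1):
--         for j in range(1, thetich_noi + 1):
--             # Nếu thể tích bánh Chưng hiện tại vượt quá thể tích nồi, không chọn
--             if thetich_banh[i - 1] > j:
--                 dp[i][j] = dp[i - 1][j]
--             else: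
--                 # Chọn bánh Chưng có thể tích i hoặc không chọn
--                 dp[i][j] = max(dp[i - 1][j], dp[i - 1][j - thetich_banh[i - 1]] + thetich_banh[i - 1])
--
--     return dp[n][thetich_noi]
-- ===== SOURCE B (Python) =====
-- def tinh_tong_thetich_max(n, thetich_banh, thetich_noi):
--     # Reachable-subset-sums approach instead of an (n+1)x(thetich_noi+1) DP grid.
--     if thetich_noi <= 0:
--         return 0
--     reachable = {0}
--     for i in range(n):
--         w = thetich_banh[i]
--         reachable |= {s + w for s in reachable if s + w <= thetich_noi}
--     return max(reachable)
-- ===== Notes on version B (the rewrite author's own statement) =====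
-- stated objective: alternative
-- what changed: Replaces the (n+1)x(thetich_noi+1) DP table with a growing set of reachable subset sums (reachable |= {s+w if s+w<=cap}) plus a trivial capacity<=0 fast path, returning max(reachable); no per-capacity grid is filled.
import Mathlib
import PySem

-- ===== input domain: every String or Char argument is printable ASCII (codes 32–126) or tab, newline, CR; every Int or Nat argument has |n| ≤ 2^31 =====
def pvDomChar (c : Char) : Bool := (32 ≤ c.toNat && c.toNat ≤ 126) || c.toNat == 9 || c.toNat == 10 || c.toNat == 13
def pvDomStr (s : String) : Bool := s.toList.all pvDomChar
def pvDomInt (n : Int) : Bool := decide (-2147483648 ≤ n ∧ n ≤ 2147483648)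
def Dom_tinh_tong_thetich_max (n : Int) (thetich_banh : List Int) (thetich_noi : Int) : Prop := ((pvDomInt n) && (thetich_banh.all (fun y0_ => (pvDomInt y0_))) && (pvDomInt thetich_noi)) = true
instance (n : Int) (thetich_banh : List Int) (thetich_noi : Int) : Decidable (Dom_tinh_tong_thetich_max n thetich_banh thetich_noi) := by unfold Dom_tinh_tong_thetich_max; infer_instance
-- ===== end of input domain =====

-- B replaces A's (n+1)×(thetich_noi+1) DP grid by a set of reachable subset sums (objective: alternative).

-- ===== PORT A =====
-- dp[i][j] read: Python indexing; out-of-range/negative gives none, .getD 0 is unreachable inside Pre_.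
def pvGet2 (dp : List (List Int)) (i j : Int) : Int :=
  (PySem.List.pyGet? ((PySem.List.pyGet? dp i).getD []) j).getD 0

-- dp[i][j] = v; in the loop i, j are nonnegative in-range indices, where .toNat/set are exact.
def pvSet2 (dp : List (List Int)) (i j : Int) (v : Int) : List (List Int) :=
  dp.set i.toNat ((dp.getD i.toNat []).set j.toNat v)

def tinh_tong_thetich_max (n : Int) (thetich_banh : List Int) (thetich_noi : Int) : Int :=
  let dp0 : List (List Int) :=
    (PySem.List.pyRange 0 (n + 1)).map (fun _ => List.replicate (thetich_noi + 1).toNat 0)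
  let dp :=
    (PySem.List.pyRange 1 (n + 1)).foldl (fun dp i =>
      (PySem.List.pyRange 1 (thetich_noi + 1)).foldl (fun dp j =>
        let w := PySem.List.pyGetD thetich_banh (i - 1) 0   -- thetich_banh[i-1]; in range inside Pre_
        if w > j then
          pvSet2 dp i j (pvGet2 dp (i - 1) j)
        else
          pvSet2 dp i j (max (pvGet2 dp (i - 1) j) (pvGet2 dp (i - 1) (j - w) + w))) dp) dp0
  pvGet2 dp n thetich_noi

-- ===== PORT B =====
def tinh_tong_thetich_max_alt (n : Int) (thetich_banh : List Int) (thetich_noi : Int) : Int :=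
  if thetich_noi ≤ 0 then 0
  else
    let reachable : PySem.Set Int := PySem.Set.ofList [0]
    let r := (PySem.List.pyRange 0 n).foldl (fun r i =>
      let w := PySem.List.pyGetD thetich_banh i 0   -- thetich_banh[i]; in range inside Pre_
      PySem.Set.union r
        ((r.filter (fun s => decide (s + w ≤ thetich_noi))).map (fun s => s + w))) reachable
    -- max(r); r always contains 0, so max? is never none and .getD 0 is unreachable
    (PySem.List.max? r (fun x => x)).getD 0

-- ===== PRECONDITION & SPEC =====
-- Pre_ excludes exactly the inputs where A raises IndexError: n < 0 or thetich_noi < 0, and,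
-- when 0 < thetich_noi, n > len(thetich_banh) or a negative volume among the first n.
def Pre_tinh_tong_thetich_max (n : Int) (thetich_banh : List Int) (thetich_noi : Int) : Prop :=
  0 ≤ n ∧ 0 ≤ thetich_noi ∧
    (0 < thetich_noi → n ≤ thetich_banh.length ∧ ∀ w ∈ thetich_banh.take n.toNat, 0 ≤ w)
instance (n : Int) (thetich_banh : List Int) (thetich_noi : Int) : Decidable (Pre_tinh_tong_thetich_max n thetich_banh thetich_noi) := by unfold Pre_tinh_tong_thetich_max; infer_instance

def pvWitness_tinh_tong_thetich_max : Int × List Int × Int := (2, ([3, 4], 5))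

def Spec_tinh_tong_thetich_max (n : Int) (thetich_banh : List Int) (thetich_noi : Int) (out : Int) : Prop := out = tinh_tong_thetich_max_alt n thetich_banh thetich_noi
instance (n : Int) (thetich_banh : List Int) (thetich_noi : Int) (out : Int) : Decidable (Spec_tinh_tong_thetich_max n thetich_banh thetich_noi out) := by unfold Spec_tinh_tong_thetich_max; infer_instance

-- ===== CLAIM (what is proved, stated in full; the proofs are below) =====
def Claim_equal_tinh_tong_thetich_max : Prop := ∀ (n : Int) (thetich_banh : List Int) (thetich_noi : Int), Dom_tinh_tong_thetich_max n thetich_banh thetich_noi → Pre_tinh_tong_thetich_max n thetich_banh thetich_noi → Spec_tinh_tong_thetich_max n thetich_banh thetich_noi (tinh_tong_thetich_max n thetich_banh thetich_noi)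

-- ===== LEMMAS AND PROOFS =====

-- all subset sums of l (empty subset included), built left to right like both loops
def pvSums (l : List Int) : List Int := l.foldl (fun acc w => acc ++ acc.map (· + w)) [0]

-- max(xs ∪ {0})
def pvM (xs : List Int) : Int := xs.foldl max 0

-- the value both programs compute: best subset sum of l that is ≤ j
def pvSpec (l : List Int) (j : Int) : Int := pvM (pvSums l |>.filter (fun s => decide (s ≤ j)))

lemma pvSums_snoc (l : List Int) (w : Int) :
    pvSums (l ++ [w]) = pvSums l ++ (pvSums l).map (· + w) := by
  simp [pvSums, List.foldl_append]

lemma zero_mem_pvSums (l : List Int) : (0 : Int) ∈ pvSums l := by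
  induction l using List.reverseRecOn with
  | nil => simp [pvSums]
  | append_singleton l w ih => rw [pvSums_snoc]; exact List.mem_append_left _ ih

lemma pvSums_nonneg (l : List Int) (h : ∀ w ∈ l, 0 ≤ w) : ∀ s ∈ pvSums l, 0 ≤ s := by
  induction l using List.reverseRecOn with
  | nil => intro s hs; simp [pvSums] at hs; omega
  | append_singleton l w ih =>
    intro s hs
    rw [pvSums_snoc] at hs
    rcases List.mem_append.1 hs with h1 | h1
    · exact ih (fun x hx => h x (List.mem_append_left _ hx)) s h1
    · rcases List.mem_map.1 h1 with ⟨t, ht, rfl⟩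
      have := ih (fun x hx => h x (List.mem_append_left _ hx)) t ht
      have := h w (List.mem_append_right _ (by simp))
      omega

lemma pvM_nonneg (xs : List Int) : 0 ≤ pvM xs := (PySem.List.le_foldl_max xs 0).1

lemma le_pvM_of_mem {xs : List Int} {x : Int} (h : x ∈ xs) : x ≤ pvM xs :=
  (PySem.List.le_foldl_max xs 0).2 x h

lemma pvM_mem_of_zero_mem {xs : List Int} (h : (0 : Int) ∈ xs) : pvM xs ∈ xs := by
  rcases PySem.List.foldl_max_mem xs (0 : Int) with h1 | h1
  · rw [pvM, h1]; exact h
  · exact h1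

lemma foldl_max_comm (t : List Int) : ∀ a b : Int,
    List.foldl max (max a b) t = max a (List.foldl max b t) := by
  induction t with
  | nil => intro a b; rfl
  | cons h t ih =>
    intro a b
    simp only [List.foldl_cons, max_assoc]
    exact ih a (max b h)

lemma pvM_append (a b : List Int) : pvM (a ++ b) = max (pvM a) (pvM b) := by
  have h0 : max (pvM a) (0 : Int) = pvM a := max_eq_left (pvM_nonneg a)
  calc pvM (a ++ b) = List.foldl max (pvM a) b := by simp [pvM, List.foldl_append]
    _ = List.foldl max (max (pvM a) 0) b := by rw [h0]
    _ = max (pvM a) (List.foldl max 0 b) := foldl_max_comm b (pvM a) 0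
    _ = max (pvM a) (pvM b) := rfl

lemma foldl_max_seed_eq (t : List Int) : ∀ (x a b : Int), x ∈ t → a ≤ x → b ≤ x →
    List.foldl max a t = List.foldl max b t := by
  induction t with
  | nil => intro x a b hx; simp at hx
  | cons h t ih =>
    intro x a b hx ha hb
    rcases List.mem_cons.1 hx with rfl | hx
    · simp only [List.foldl_cons, max_eq_right ha, max_eq_right hb]
    · by_cases hh : h ≤ x
      · exact ih x (max a h) (max b h) hx (max_le ha hh) (max_le hb hh)
      · have : max a h = max b h := by
          rw [max_eq_right (by omega), max_eq_right (by omega)]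
        simp only [List.foldl_cons, this]

lemma foldl_max_map_add (ys : List Int) : ∀ c w : Int,
    List.foldl max c (ys.map (· + w)) = List.foldl max (c - w) ys + w := by
  induction ys with
  | nil => intro c w; simp
  | cons h t ih =>
    intro c w
    simp only [List.map_cons, List.foldl_cons, ih]
    congr 1
    rw [← max_sub_sub_right]
    congr 1
    omega

lemma pvM_map_add {ys : List Int} {w : Int} (h0 : (0 : Int) ∈ ys) (hw : 0 ≤ w) :
    pvM (ys.map (· + w)) = pvM ys + w := by
  rw [pvM, foldl_max_map_add ys 0 w]
  congr 1
  exact foldl_max_seed_eq ys 0 (0 - w) 0 h0 (by omega) (by omega)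

lemma pvSpec_nil (j : Int) : pvSpec [] j = 0 := by
  by_cases h : (0 : Int) ≤ j <;> simp [pvSpec, pvSums, pvM, h]

lemma pvSpec_nonneg (l : List Int) (j : Int) : 0 ≤ pvSpec l j := pvM_nonneg _

lemma pvSpec_snoc (l : List Int) (w j : Int) (hw : 0 ≤ w)
    (hnn : ∀ s ∈ pvSums l, 0 ≤ s) :
    pvSpec (l ++ [w]) j =
      if w > j then pvSpec l j else max (pvSpec l j) (pvSpec l (j - w) + w) := by
  rw [pvSpec, pvSums_snoc, List.filter_append, pvM_append]
  by_cases hwj : w > j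
  · have hempty : ((pvSums l).map (· + w)).filter (fun s => decide (s ≤ j)) = [] := by
      rw [List.filter_eq_nil_iff]
      intro x hx
      rcases List.mem_map.1 hx with ⟨s, hs, rfl⟩
      have := hnn s hs
      simp only [decide_eq_true_eq]
      omega
    rw [hempty, if_pos hwj]
    show max (pvSpec l j) (pvM []) = pvSpec l j
    exact max_eq_left (pvSpec_nonneg l j)
  · rw [if_neg hwj]
    have hfm : ((pvSums l).map (· + w)).filter (fun s => decide (s ≤ j)) =
        ((pvSums l).filter (fun s => decide (s ≤ j - w))).map (· + w) := by
      rw [List.filter_map]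
      congr 1
      apply List.filter_congr
      intro s _
      simp only [Function.comp_apply, decide_eq_decide]
      omega
    rw [hfm, pvM_map_add (by simp; exact ⟨zero_mem_pvSums l, by omega⟩) hw]
    rfl

-- ---------- B side ----------

lemma alt_mem (V : Int) (hV : 0 ≤ V) (items : List Int) (hw : ∀ w ∈ items, 0 ≤ w) :
    ∀ x : Int, x ∈ items.foldl (fun r w =>
      PySem.Set.union r
        ((r.filter (fun s => decide (s + w ≤ V))).map (fun s => s + w)))
        (PySem.Set.ofList [0]) ↔ (x ∈ pvSums items ∧ x ≤ V) := by
  induction items using List.reverseRecOn with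
  | nil =>
    intro x
    simp [pvSums, PySem.Set.mem_ofList]
    omega
  | append_singleton l w ih =>
    have hwl : ∀ u ∈ l, 0 ≤ u := fun u hu => hw u (List.mem_append_left _ hu)
    have ihx := ih hwl
    have hw0 : 0 ≤ w := hw w (List.mem_append_right _ (by simp))
    intro x
    rw [List.foldl_append, List.foldl_cons, List.foldl_nil, PySem.Set.mem_union,
      pvSums_snoc]
    constructor
    · rintro (hx | hx)
      · rcases (ihx x).1 hx with ⟨h1, h2⟩
        exact ⟨List.mem_append_left _ h1, h2⟩
      · rcases List.mem_map.1 hx with ⟨s, hs, rfl⟩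
        rcases List.mem_filter.1 hs with ⟨hsr, hsc⟩
        simp only [decide_eq_true_eq] at hsc
        exact ⟨List.mem_append_right _ (List.mem_map.2 ⟨s, ((ihx s).1 hsr).1, rfl⟩), hsc⟩
    · rintro ⟨h1, h2⟩
      rcases List.mem_append.1 h1 with h3 | h3
      · exact Or.inl ((ihx x).2 ⟨h3, h2⟩)
      · rcases List.mem_map.1 h3 with ⟨s, hs, rfl⟩
        have hs0 : 0 ≤ s := pvSums_nonneg l hwl s hs
        refine Or.inr (List.mem_map.2 ⟨s, List.mem_filter.2 ⟨(ihx s).2 ⟨hs, by omega⟩, by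
          simp only [decide_eq_true_eq]; omega⟩, rfl⟩)

lemma alt_eq_pvSpec (n : Int) (tb : List Int) (V : Int) (hn : 0 ≤ n) (hV : 0 < V)
    (hlen : n ≤ tb.length) (hw : ∀ w ∈ tb.take n.toNat, 0 ≤ w) :
    tinh_tong_thetich_max_alt n tb V = pvSpec (tb.take n.toNat) V := by
  simp only [tinh_tong_thetich_max_alt, if_neg (by omega : ¬ V ≤ 0)]
  set items := tb.take n.toNat with hitems
  have hlenitems : items.length = n.toNat := by
    rw [hitems, List.length_take]; omega
  -- the index loop over range(n) is the fold over the first n volumes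
  have hfold : (PySem.List.pyRange 0 n).foldl (fun r i =>
      PySem.Set.union r
        (((r : PySem.Set Int).filter
            (fun s => decide (s + PySem.List.pyGetD tb i 0 ≤ V))).map
          (fun s => s + PySem.List.pyGetD tb i 0))) (PySem.Set.ofList [0]) =
      items.foldl (fun r w =>
        PySem.Set.union r
          ((r.filter (fun s => decide (s + w ≤ V))).map (fun s => s + w)))
        (PySem.Set.ofList [0]) := by
    have hcongr : ∀ (acc : PySem.Set Int) (i : Int), i ∈ PySem.List.pyRange 0 n →
        PySem.Set.union acc
          ((acc.filter (fun s => decide (s + PySem.List.pyGetD tb i 0 ≤ V))).map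
            (fun s => s + PySem.List.pyGetD tb i 0)) =
        PySem.Set.union acc
          ((acc.filter (fun s => decide (s + PySem.List.pyGetD items i 0 ≤ V))).map
            (fun s => s + PySem.List.pyGetD items i 0)) := by
      intro acc i hi
      rcases (PySem.List.mem_pyRange_one).1 hi with ⟨h0, hiN⟩
      have hgd : PySem.List.pyGetD items i 0 = PySem.List.pyGetD tb i 0 := by
        rw [show i = ((i.toNat : Nat) : Int) by omega, PySem.List.pyGetD_natCast,
          PySem.List.pyGetD_natCast, hitems]
        have hi' : i.toNat < n.toNat := by omega
        rw [List.getD_eq_getElem?_getD, List.getD_eq_getElem?_getD, List.getElem?_take,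
          if_pos hi']
      rw [hgd]
    rw [PySem.List.foldl_congr_mem _ _ _ _ hcongr]
    have hlen' : PySem.List.len items = n := by
      simp [PySem.List.len, hlenitems]
      omega
    have hrange : PySem.List.pyRange 0 n = PySem.List.pyRange 0 (PySem.List.len items) := by
      rw [hlen']
    rw [hrange,
      PySem.List.foldl_pyRange_pyGetD items 0
        (fun r w => PySem.Set.union r
          ((r.filter (fun s => decide (s + w ≤ V))).map (fun s => s + w)))
        (PySem.Set.ofList [0]) le_rfl]
    simp
  rw [hfold]
  set r := items.foldl (fun r w =>
      PySem.Set.union r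
        ((r.filter (fun s => decide (s + w ≤ V))).map (fun s => s + w)))
      (PySem.Set.ofList [0]) with hr
  have hmem := alt_mem V (by omega) items hw
  have h0r : (0 : Int) ∈ r := (hmem 0).2 ⟨zero_mem_pvSums items, by omega⟩
  have hne : r ≠ [] := fun h => by rw [h] at h0r; simp at h0r
  obtain ⟨m, hm⟩ : ∃ m, PySem.List.max? r (fun x => x) = some m := by
    cases hmax : PySem.List.max? r (fun x => x) with
    | none => exact absurd ((PySem.List.max?_eq_none_iff r _).1 hmax) hne
    | some m => exact ⟨m, rfl⟩
  rw [hm, Option.getD_some]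
  have hmmem := PySem.List.max?_mem hm
  have hmmax := PySem.List.max?_isMax hm
  rcases (hmem m).1 hmmem with ⟨hms, hmV⟩
  have hmf : m ∈ (pvSums items).filter (fun s => decide (s ≤ V)) :=
    List.mem_filter.2 ⟨hms, by simpa using hmV⟩
  have hMf : pvM ((pvSums items).filter (fun s => decide (s ≤ V))) ∈
      (pvSums items).filter (fun s => decide (s ≤ V)) :=
    pvM_mem_of_zero_mem (List.mem_filter.2 ⟨zero_mem_pvSums items, by simpa using hV.le⟩)
  rcases List.mem_filter.1 hMf with ⟨hM1, hM2⟩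
  simp only [decide_eq_true_eq] at hM2
  have h1 : m ≤ pvSpec items V := le_pvM_of_mem hmf
  have h2 : pvSpec items V ≤ m := hmmax _ ((hmem _).2 ⟨hM1, hM2⟩)
  omega

-- ---------- A side ----------

lemma pvGet2_natCast (dp : List (List Int)) (i j : Nat) :
    pvGet2 dp (i : Int) (j : Int) = (((dp[i]?).getD [])[j]?).getD 0 := by
  simp [pvGet2, PySem.List.pyGet?_natCast]

lemma pvSet2_length (dp : List (List Int)) (i j : Int) (v : Int) :
    (pvSet2 dp i j v).length = dp.length := by simp [pvSet2]

lemma pvSet2_row_other (dp : List (List Int)) (i j : Nat) (v : Int) (p : Nat) (hp : p ≠ i) :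
    (pvSet2 dp (i : Int) (j : Int) v)[p]? = dp[p]? := by
  simp only [pvSet2, Int.toNat_natCast]
  exact List.getElem?_set_ne (by omega)

lemma pvSet2_get_same (dp : List (List Int)) (i j : Nat) (v : Int)
    (hi : i < dp.length) (hj : j < (dp.getD i []).length) :
    pvGet2 (pvSet2 dp (i : Int) (j : Int) v) (i : Int) (j : Int) = v := by
  rw [pvGet2_natCast]
  simp only [pvSet2, Int.toNat_natCast]
  rw [List.getElem?_set_self (by simpa using hi)]
  simp only [Option.getD_some]
  rw [List.getElem?_set_self (by simpa using hj)]
  rfl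

lemma pvSet2_get_same_row_other (dp : List (List Int)) (i j : Nat) (v : Int) (j' : Nat)
    (hj' : j' ≠ j) :
    pvGet2 (pvSet2 dp (i : Int) (j : Int) v) (i : Int) (j' : Int) = pvGet2 dp (i : Int) (j' : Int) := by
  rw [pvGet2_natCast, pvGet2_natCast]
  simp only [pvSet2, Int.toNat_natCast]
  by_cases hi : i < dp.length
  · rw [List.getElem?_set_self (by simpa using hi)]
    simp only [Option.getD_some]
    rw [List.getElem?_set_ne (by omega)]
    have : dp.getD i [] = (dp[i]?).getD [] := by
      rw [List.getD_eq_getElem?_getD]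
    rw [this]
  · rw [List.set_eq_of_length_le (by omega)]

lemma pvM_eq_zero_of_nonpos {xs : List Int} (h : ∀ x ∈ xs, x ≤ 0) : pvM xs = 0 := by
  have h1 := pvM_nonneg xs
  rcases PySem.List.foldl_max_mem xs (0 : Int) with h2 | h2
  · exact h2
  · have h3 : pvM xs ∈ xs := h2
    have := h _ h3; omega

lemma pvSpec_zero (l : List Int) : pvSpec l 0 = 0 := by
  apply pvM_eq_zero_of_nonpos
  intro x hx
  rcases List.mem_filter.1 hx with ⟨-, h⟩
  simpa using h

lemma pvGet2_congr_row (dp dp' : List (List Int)) (p : Nat) (h : dp'[p]? = dp[p]?) (j : Int) :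
    pvGet2 dp' (p : Int) j = pvGet2 dp (p : Int) j := by
  simp only [pvGet2, PySem.List.pyGet?_natCast, h]

-- the inner j-loop of A, as a fold over an arbitrary range (proof-side name for the port's inline fold)
def pvInner (tb : List Int) (i : Int) (dp : List (List Int)) (rng : List Int) : List (List Int) :=
  rng.foldl (fun dp j =>
    let w := PySem.List.pyGetD tb (i - 1) 0
    if w > j then pvSet2 dp i j (pvGet2 dp (i - 1) j)
    else pvSet2 dp i j (max (pvGet2 dp (i - 1) j) (pvGet2 dp (i - 1) (j - w) + w))) dp

lemma pvInner_snoc (tb : List Int) (i : Int) (dp : List (List Int)) (rng : List Int) (j : Int) :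
    pvInner tb i dp (rng ++ [j]) =
      (fun dp j =>
        let w := PySem.List.pyGetD tb (i - 1) 0
        if w > j then pvSet2 dp i j (pvGet2 dp (i - 1) j)
        else pvSet2 dp i j (max (pvGet2 dp (i - 1) j) (pvGet2 dp (i - 1) (j - w) + w)))
      (pvInner tb i dp rng) j := by
  simp [pvInner, List.foldl_append]

lemma inner_loop (tb : List Int) (VN : Nat) (q : Nat) (w : Int)
    (hwdef : PySem.List.pyGetD tb ((q : Int) + 1 - 1) 0 = w) (hw0 : 0 ≤ w)
    (hsnoc : tb.take (q + 1) = tb.take q ++ [w])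
    (hnn : ∀ s ∈ pvSums (tb.take q), 0 ≤ s)
    (N : Nat) (hqN : q + 1 ≤ N)
    (dp : List (List Int))
    (hlen : dp.length = N + 1)
    (hrows : ∀ (p : Nat) (r : List Int), dp[p]? = some r → r.length = VN + 1)
    (hprev : ∀ j : Nat, j ≤ VN → pvGet2 dp (q : Int) (j : Int) = pvSpec (tb.take q) (j : Int)) :
    ∀ m : Nat, m ≤ VN →
    (pvInner tb ((q : Int) + 1) dp (PySem.List.pyRange 1 ((m : Int) + 1))).length = N + 1 ∧
    (∀ (p : Nat) (r : List Int),
        (pvInner tb ((q : Int) + 1) dp (PySem.List.pyRange 1 ((m : Int) + 1)))[p]? = some r →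
        r.length = VN + 1) ∧
    (∀ p : Nat, p ≠ q + 1 →
        (pvInner tb ((q : Int) + 1) dp (PySem.List.pyRange 1 ((m : Int) + 1)))[p]? = dp[p]?) ∧
    (∀ j : Nat, j ≤ VN →
        pvGet2 (pvInner tb ((q : Int) + 1) dp (PySem.List.pyRange 1 ((m : Int) + 1)))
            ((q : Int) + 1) (j : Int) =
          if 1 ≤ j ∧ j ≤ m then pvSpec (tb.take (q + 1)) (j : Int)
          else pvGet2 dp ((q : Int) + 1) (j : Int)) := by
  intro m
  induction m with
  | zero =>
    intro _
    rw [show ((0 : Nat) : Int) + 1 = 1 by norm_num, PySem.List.pyRange_one_eq_nil le_rfl]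
    refine ⟨hlen, hrows, fun p _ => rfl, fun j hj => ?_⟩
    rw [if_neg (by omega)]
    rfl
  | succ m ih =>
    intro hm1
    obtain ⟨ihlen, ihrows, ihother, ihval⟩ := ih (by omega)
    set dp' := pvInner tb ((q : Int) + 1) dp (PySem.List.pyRange 1 ((m : Int) + 1)) with hdp'
    have hrange : PySem.List.pyRange 1 (((m + 1 : Nat) : Int) + 1) =
        PySem.List.pyRange 1 ((m : Int) + 1) ++ [(m : Int) + 1] := by
      push_cast
      exact PySem.List.pyRange_one_succ_right (by omega)
    rw [hrange, pvInner_snoc]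
    beta_reduce
    rw [hwdef]
    have hq1 : ((q : Int) + 1) = ((q + 1 : Nat) : Int) := by push_cast; ring
    have hm1' : ((m : Int) + 1) = ((m + 1 : Nat) : Int) := by push_cast; ring
    have hq1lt : q + 1 < dp'.length := by omega
    have hrowsome : dp'[q + 1]? = some (dp'[q + 1]) := List.getElem?_eq_getElem hq1lt
    have hrowlen : (dp'.getD (q + 1) []).length = VN + 1 := by
      rw [List.getD_eq_getElem?_getD, hrowsome]
      exact ihrows _ _ hrowsome
    have hm1lt : m + 1 < (dp'.getD (q + 1) []).length := by omega
    -- reading the previous row (row q) from dp' = reading it from dp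
    have hreadprev : ∀ j : Int, pvGet2 dp' ((q : Int) + 1 - 1) j = pvGet2 dp (q : Int) j := by
      intro j
      rw [show (q : Int) + 1 - 1 = (q : Int) by ring]
      exact pvGet2_congr_row dp dp' q (ihother q (by omega)) j
    -- the written value is pvSpec (tb.take (q+1)) (m+1), in both branches
    have hval :
        (if w > (m : Int) + 1 then
          pvSet2 dp' ((q : Int) + 1) ((m : Int) + 1)
            (pvGet2 dp' ((q : Int) + 1 - 1) ((m : Int) + 1))
        else
          pvSet2 dp' ((q : Int) + 1) ((m : Int) + 1)
            (max (pvGet2 dp' ((q : Int) + 1 - 1) ((m : Int) + 1))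
              (pvGet2 dp' ((q : Int) + 1 - 1) (((m : Int) + 1) - w) + w))) =
        pvSet2 dp' ((q : Int) + 1) ((m : Int) + 1)
          (pvSpec (tb.take (q + 1)) ((m : Int) + 1)) := by
      have hspec : pvSpec (tb.take (q + 1)) ((m : Int) + 1) =
          if w > (m : Int) + 1 then pvSpec (tb.take q) ((m : Int) + 1)
          else max (pvSpec (tb.take q) ((m : Int) + 1))
            (pvSpec (tb.take q) (((m : Int) + 1) - w) + w) := by
        rw [hsnoc]
        exact pvSpec_snoc _ _ _ hw0 hnn
      have hr1 : pvGet2 dp' ((q : Int) + 1 - 1) ((m : Int) + 1) =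
          pvSpec (tb.take q) ((m : Int) + 1) := by
        rw [hreadprev, hm1', hprev (m + 1) hm1]
      by_cases hcond : w > (m : Int) + 1
      · rw [if_pos hcond, hspec, if_pos hcond, hr1]
      · rw [if_neg hcond, hspec, if_neg hcond, hr1]
        have hk : ((m : Int) + 1) - w = (((((m : Int) + 1) - w).toNat : Nat) : Int) := by omega
        have hkVN : (((m : Int) + 1) - w).toNat ≤ VN := by omega
        rw [hk, hreadprev, hprev _ hkVN]
    rw [hval]
    have hother : ∀ p : Nat, p ≠ q + 1 →
        (pvSet2 dp' ((q : Int) + 1) ((m : Int) + 1) (pvSpec (tb.take (q + 1)) ((m : Int) + 1)))[p]? =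
        dp'[p]? := by
      intro p hpq
      rw [hq1, hm1']
      exact pvSet2_row_other dp' (q + 1) (m + 1) _ p hpq
    refine ⟨?_, ?_, ?_, ?_⟩
    · rw [pvSet2_length]; exact ihlen
    · intro p r hp
      by_cases hpq : p = q + 1
      · subst hpq
        rw [hq1, hm1'] at hp
        simp only [pvSet2, Int.toNat_natCast] at hp
        rw [List.getElem?_set_self (by omega)] at hp
        cases hp
        simpa using hrowlen
      · rw [hother p hpq] at hp
        exact ihrows p r hp
    · intro p hpq
      rw [hother p hpq]
      exact ihother p hpq
    · intro j hj
      by_cases hjm : j = m + 1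
      · subst hjm
        rw [if_pos (by omega), hq1, hm1',
          pvSet2_get_same dp' (q + 1) (m + 1) _ hq1lt hm1lt]
      · have : pvGet2
            (pvSet2 dp' ((q : Int) + 1) ((m : Int) + 1) (pvSpec (tb.take (q + 1)) ((m : Int) + 1)))
            ((q : Int) + 1) (j : Int) = pvGet2 dp' ((q : Int) + 1) (j : Int) := by
          rw [hq1, hm1']
          exact pvSet2_get_same_row_other dp' (q + 1) (m + 1) _ j hjm
        rw [this, ihval j hj]
        by_cases h1 : 1 ≤ j ∧ j ≤ m
        · rw [if_pos h1, if_pos (by omega)]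
        · rw [if_neg h1, if_neg (by omega)]

lemma pvGet2_replicate (a b : Nat) (p : Nat) (j : Int) :
    pvGet2 (List.replicate a (List.replicate b (0 : Int))) (p : Int) j = 0 := by
  simp only [pvGet2, PySem.List.pyGet?_natCast, List.getElem?_replicate]
  by_cases hp : p < a
  · simp only [if_pos hp, Option.getD_some]
    rcases hj : PySem.List.pyGet? (List.replicate b (0 : Int)) j with _ | v
    · rfl
    · have := PySem.List.mem_of_pyGet?_eq_some _ hj
      simp only [List.mem_replicate] at this
      simp [this.2]
  · simp only [if_neg hp, Option.getD_none]
    simp [PySem.List.pyGet?]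

lemma outer_loop (tb : List Int) (VN : Nat) (N : Nat)
    (hlenN : N ≤ tb.length)
    (hw : ∀ w ∈ tb.take N, 0 ≤ w) :
    ∀ q : Nat, q ≤ N →
    ((PySem.List.pyRange 1 ((q : Int) + 1)).foldl
        (fun dp i => pvInner tb i dp (PySem.List.pyRange 1 ((VN : Int) + 1)))
        (List.replicate (N + 1) (List.replicate (VN + 1) (0 : Int)))).length = N + 1 ∧
    (∀ (p : Nat) (r : List Int),
        ((PySem.List.pyRange 1 ((q : Int) + 1)).foldl
          (fun dp i => pvInner tb i dp (PySem.List.pyRange 1 ((VN : Int) + 1)))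
          (List.replicate (N + 1) (List.replicate (VN + 1) (0 : Int))))[p]? = some r →
        r.length = VN + 1) ∧
    (∀ p : Nat, p ≤ q → ∀ j : Nat, j ≤ VN →
        pvGet2 ((PySem.List.pyRange 1 ((q : Int) + 1)).foldl
          (fun dp i => pvInner tb i dp (PySem.List.pyRange 1 ((VN : Int) + 1)))
          (List.replicate (N + 1) (List.replicate (VN + 1) (0 : Int)))) (p : Int) (j : Int) =
        pvSpec (tb.take p) (j : Int)) ∧
    (∀ p : Nat, q < p →
        pvGet2 ((PySem.List.pyRange 1 ((q : Int) + 1)).foldl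
          (fun dp i => pvInner tb i dp (PySem.List.pyRange 1 ((VN : Int) + 1)))
          (List.replicate (N + 1) (List.replicate (VN + 1) (0 : Int)))) (p : Int) 0 = 0) := by
  intro q
  induction q with
  | zero =>
    intro _
    rw [show ((0 : Nat) : Int) + 1 = 1 by norm_num, PySem.List.pyRange_one_eq_nil le_rfl,
      List.foldl_nil]
    refine ⟨by simp, ?_, ?_, ?_⟩
    · intro p r hp
      rw [List.getElem?_replicate] at hp
      split_ifs at hp
      cases hp
      simp
    · intro p hp j hj
      interval_cases p
      rw [pvGet2_replicate]
      simp [pvSpec_nil]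
    · intro p _
      exact pvGet2_replicate _ _ p 0
  | succ q ihq =>
    intro hq1
    obtain ⟨ihlen, ihrows, ihval, ihzero⟩ := ihq (by omega)
    have hrange : PySem.List.pyRange 1 (((q + 1 : Nat) : Int) + 1) =
        PySem.List.pyRange 1 ((q : Int) + 1) ++ [(q : Int) + 1] := by
      push_cast
      exact PySem.List.pyRange_one_succ_right (by omega)
    rw [hrange, List.foldl_append, List.foldl_cons, List.foldl_nil]
    set dpq := (PySem.List.pyRange 1 ((q : Int) + 1)).foldl
        (fun dp i => pvInner tb i dp (PySem.List.pyRange 1 ((VN : Int) + 1)))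
        (List.replicate (N + 1) (List.replicate (VN + 1) (0 : Int))) with hdpq
    have hqlt : q < tb.length := by omega
    have hsome : tb[q]? = some (tb[q]) := List.getElem?_eq_getElem hqlt
    have hwdef : PySem.List.pyGetD tb ((q : Int) + 1 - 1) 0 = tb[q] := by
      rw [show (q : Int) + 1 - 1 = ((q : Nat) : Int) by ring, PySem.List.pyGetD_natCast,
        List.getD_eq_getElem?_getD, hsome, Option.getD_some]
    have hqlt' : q < (tb.take N).length := by
      rw [List.length_take]; omega
    have hmemtake : tb[q] ∈ tb.take N := by
      have h1 : (tb.take N)[q]'hqlt' = tb[q] := List.getElem_take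
      rw [← h1]
      exact List.getElem_mem _
    have hw0 : 0 ≤ tb[q] := hw _ hmemtake
    have hsnoc : tb.take (q + 1) = tb.take q ++ [tb[q]] := by
      rw [List.take_add_one, hsome]
      rfl
    have htksub : ∀ x ∈ tb.take q, x ∈ tb.take N := by
      intro x hx
      have : tb.take q = List.take q (tb.take N) := by
        rw [List.take_take, min_eq_left (by omega)]
      rw [this] at hx
      exact List.take_subset _ _ hx
    have hnn : ∀ s ∈ pvSums (tb.take q), 0 ≤ s :=
      pvSums_nonneg _ (fun x hx => hw x (htksub x hx))
    obtain ⟨jlen, jrows, jother, jval⟩ := inner_loop tb VN q (tb[q]) hwdef hw0 hsnoc hnn N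
      (by omega) dpq ihlen ihrows (fun j hj => ihval q le_rfl j hj) VN le_rfl
    refine ⟨jlen, jrows, ?_, ?_⟩
    · intro p hp j hj
      by_cases hpq : p = q + 1
      · subst hpq
        by_cases hj0 : j = 0
        · subst hj0
          have h1 := jval 0 (by omega)
          rw [if_neg (by omega)] at h1
          rw [show ((q + 1 : Nat) : Int) = (q : Int) + 1 by push_cast; ring, h1]
          have h2 := ihzero (q + 1) (by omega)
          rw [show ((q + 1 : Nat) : Int) = (q : Int) + 1 by push_cast; ring] at h2
          rw [show ((0 : Nat) : Int) = 0 by norm_num, h2, pvSpec_zero]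
        · have h1 := jval j hj
          rw [if_pos (by omega)] at h1
          rw [show ((q + 1 : Nat) : Int) = (q : Int) + 1 by push_cast; ring, h1]
      · have hrow := jother p (by omega)
        rw [pvGet2_congr_row dpq _ p hrow]
        exact ihval p (by omega) j hj
    · intro p hp
      have hrow := jother p (by omega)
      rw [pvGet2_congr_row dpq _ p hrow]
      exact ihzero p (by omega)

lemma a_eq_pvSpec (n : Int) (tb : List Int) (V : Int) (hn : 0 ≤ n) (hV : 0 < V)
    (hlen : n ≤ tb.length) (hw : ∀ w ∈ tb.take n.toNat, 0 ≤ w) :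
    tinh_tong_thetich_max n tb V = pvSpec (tb.take n.toNat) V := by
  obtain ⟨N, rfl⟩ : ∃ N : Nat, n = (N : Int) := ⟨n.toNat, by omega⟩
  obtain ⟨VN, rfl⟩ : ∃ VN : Nat, V = (VN : Int) := ⟨V.toNat, by omega⟩
  show pvGet2 ((PySem.List.pyRange 1 ((N : Int) + 1)).foldl
      (fun dp i => pvInner tb i dp (PySem.List.pyRange 1 ((VN : Int) + 1)))
      ((PySem.List.pyRange 0 ((N : Int) + 1)).map
        (fun _ => List.replicate ((VN : Int) + 1).toNat 0))) (N : Int) (VN : Int) =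
    pvSpec (tb.take (N : Int).toNat) (VN : Int)
  have hdp0 : (PySem.List.pyRange 0 ((N : Int) + 1)).map
      (fun _ => List.replicate ((VN : Int) + 1).toNat 0) =
      List.replicate (N + 1) (List.replicate (VN + 1) (0 : Int)) := by
    rw [show ((VN : Int) + 1).toNat = VN + 1 by omega]
    rw [List.map_const', PySem.List.length_pyRange_one,
      show ((N : Int) + 1 - 0).toNat = N + 1 by omega]
  rw [hdp0]
  obtain ⟨_, _, hval, _⟩ := outer_loop tb VN N (by exact_mod_cast hlen)
    (by simpa using hw) N le_rfl
  have h := hval N le_rfl VN le_rfl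
  simpa using h

lemma a_zero (n : Int) (tb : List Int) (hn : 0 ≤ n) : tinh_tong_thetich_max n tb 0 = 0 := by
  show pvGet2 ((PySem.List.pyRange 1 (n + 1)).foldl
      (fun dp i => pvInner tb i dp (PySem.List.pyRange 1 (0 + 1)))
      ((PySem.List.pyRange 0 (n + 1)).map (fun _ => List.replicate ((0 : Int) + 1).toNat 0))) n 0 = 0
  have h1 : PySem.List.pyRange 1 ((0 : Int) + 1) = [] := by
    norm_num
  have h2 : (PySem.List.pyRange 1 (n + 1)).foldl
      (fun dp i => pvInner tb i dp (PySem.List.pyRange 1 ((0 : Int) + 1)))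
      ((PySem.List.pyRange 0 (n + 1)).map (fun _ => List.replicate ((0 : Int) + 1).toNat 0)) =
      (PySem.List.pyRange 0 (n + 1)).map (fun _ => List.replicate ((0 : Int) + 1).toNat 0) := by
    rw [h1]
    simp only [pvInner, List.foldl_nil]
    exact PySem.List.foldl_ignore _ _
  rw [h2]
  have hdp0 : (PySem.List.pyRange 0 (n + 1)).map (fun _ => List.replicate ((0 : Int) + 1).toNat 0) =
      List.replicate (n.toNat + 1) (List.replicate 1 (0 : Int)) := by
    rw [show ((0 : Int) + 1).toNat = 1 by norm_num]
    rw [List.map_const', PySem.List.length_pyRange_one,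
      show (n + 1 - 0).toNat = n.toNat + 1 by omega]
  rw [hdp0, show n = ((n.toNat : Nat) : Int) by omega]
  exact pvGet2_replicate _ _ _ 0

-- ===== VERDICT (by name: the statement is the Claim_ definition above) =====
theorem tinh_tong_thetich_max_spec : Claim_equal_tinh_tong_thetich_max := by
  intro n tb V _ hpre
  obtain ⟨hn, hV, hrest⟩ := hpre
  unfold Spec_tinh_tong_thetich_max
  by_cases h0 : V = 0
  · subst h0
    rw [a_zero n tb hn]
    simp [tinh_tong_thetich_max_alt]
  · obtain ⟨hlen, hw⟩ := hrest (by omega)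
    rw [a_eq_pvSpec n tb V hn (by omega) hlen hw,
      alt_eq_pvSpec n tb V hn (by omega) hlen hw]
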